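-- pv_equiv track=rewrite | github.com/SonJinHYo/CodingTest | 프로그래머스/lv3/68646. 풍선 터트리기/풍선 터트리기.py | solution
-- ===== SOURCE A (Python) =====
-- from heapq import heappush,heappop,heapify
--
-- def solution(a):
--     if len(a)<= 3:
--         return len(a)
--
--     answer = 2
--     left_heap,left_min = [a[0]],[a[0]]
--     right_heap,right_min = [a[-1]],[a[-1]]
--
--     for i in range(1,len(a)-1):
--         heappush(left_heap,a[i])
--         left_min.append(left_heap[0])
--
--         heappush(right_heap,a[-i-1])
--         right_min.append(right_heap[0])
--     right_min = [i for i in reversed(right_min)]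
--
--     for i in range(1,len(a)-1):
--         if not (left_min[i]<a[i] and right_min[i]<a[i]):
--             answer+=1
--
--     return answer
-- ===== SOURCE B (Python) =====
-- def solution(a):
--     n = len(a)
--     if n <= 3:
--         return n
--     # suffix minima, built back-to-front: after reversing, suf[i-1] == min(a[i+1:])
--     suf = []
--     m = a[n - 1]
--     for i in range(n - 2, 0, -1):
--         suf.append(m)
--         m = min(m, a[i])
--     suf.reverse()
--     ans = 2
--     pre = a[0]  # running prefix minimum min(a[:i])
--     for i in range(1, n - 1):
--         if a[i] <= pre or a[i] <= suf[i - 1]: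
--             ans += 1
--         pre = min(pre, a[i])
--     return ans
-- ===== Notes on version B (the rewrite author's own statement) =====
-- stated objective: simpler
-- what changed: replaces the two heaps (a heappush per element just to read the running minimum at heap[0]) by a plain running prefix-minimum and a suffix-minimum array built in one backward pass
import Mathlib
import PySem

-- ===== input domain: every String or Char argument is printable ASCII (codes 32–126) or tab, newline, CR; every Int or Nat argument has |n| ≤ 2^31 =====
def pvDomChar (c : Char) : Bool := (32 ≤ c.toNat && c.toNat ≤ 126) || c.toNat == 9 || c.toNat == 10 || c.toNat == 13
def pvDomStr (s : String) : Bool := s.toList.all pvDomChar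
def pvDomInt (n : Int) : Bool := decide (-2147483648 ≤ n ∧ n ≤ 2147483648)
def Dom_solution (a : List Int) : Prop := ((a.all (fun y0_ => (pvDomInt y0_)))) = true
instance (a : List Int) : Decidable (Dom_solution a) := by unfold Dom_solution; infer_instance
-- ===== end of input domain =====

-- B replaces A's two heaps (a heappush per element, reading the running minimum at heap[0]) by a
-- running prefix minimum and a suffix-minimum array built in one backward pass (simpler; no heaps).

-- ===== PORT A =====
-- CPython's heapq.heappush: append the item, then _siftdown(heap, 0, len(heap)-1),
-- ported step for step ((pos-1)>>1 on a Nat is (pos-1)/2; every position read or set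
-- is in range at the call sites, so getD's default is never used).
def hpLoop (heap : List Int) (newitem : Int) (pos : Nat) : List Int :=
  if 0 < pos then
    if newitem < heap.getD ((pos - 1) / 2) 0 then
      hpLoop (heap.set pos (heap.getD ((pos - 1) / 2) 0)) newitem ((pos - 1) / 2)
    else heap.set pos newitem
  else heap.set pos newitem
termination_by pos
decreasing_by exact Nat.lt_of_le_of_lt (Nat.div_le_self _ _) (by omega)

def heappush (heap : List Int) (item : Int) : List Int :=
  hpLoop (heap ++ [item]) item heap.length

def solution (a : List Int) : Int :=
  if PySem.List.len a ≤ 3 then PySem.List.len a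
  else
    let st := (PySem.List.pyRange 1 (PySem.List.len a - 1) 1).foldl
      (fun (s : (List Int × List Int) × (List Int × List Int)) i =>
        ((let lh := heappush s.1.1 (PySem.List.pyGetD a i 0)
          (lh, s.1.2 ++ [PySem.List.pyGetD lh 0 0])),
         (let rh := heappush s.2.1 (PySem.List.pyGetD a (-i - 1) 0)
          (rh, s.2.2 ++ [PySem.List.pyGetD rh 0 0]))))
      (([PySem.List.pyGetD a 0 0], [PySem.List.pyGetD a 0 0]),
       ([PySem.List.pyGetD a (-1) 0], [PySem.List.pyGetD a (-1) 0]))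
    let rightMin := st.2.2.reverse
    (PySem.List.pyRange 1 (PySem.List.len a - 1) 1).foldl
      (fun answer i =>
        if ¬ (PySem.List.pyGetD st.1.2 i 0 < PySem.List.pyGetD a i 0 ∧
              PySem.List.pyGetD rightMin i 0 < PySem.List.pyGetD a i 0)
        then answer + 1 else answer) 2

-- ===== PORT B =====
def solution_alt (a : List Int) : Int :=
  let n := PySem.List.len a
  if n ≤ 3 then n
  else
    let sm := (PySem.List.pyRange (n - 2) 0 (-1)).foldl
      (fun (s : List Int × Int) i => (s.1 ++ [s.2], min s.2 (PySem.List.pyGetD a i 0)))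
      ([], PySem.List.pyGetD a (n - 1) 0)
    let suf := sm.1.reverse
    ((PySem.List.pyRange 1 (n - 1) 1).foldl
      (fun (s : Int × Int) i =>
        ((if PySem.List.pyGetD a i 0 ≤ s.2 ∨
             PySem.List.pyGetD a i 0 ≤ PySem.List.pyGetD suf (i - 1) 0
          then s.1 + 1 else s.1),
         min s.2 (PySem.List.pyGetD a i 0)))
      (2, PySem.List.pyGetD a 0 0)).1

-- ===== PRECONDITION & SPEC =====
def Spec_solution (a : List Int) (out : Int) : Prop := out = solution_alt a
instance (a : List Int) (out : Int) : Decidable (Spec_solution a out) := by unfold Spec_solution; infer_instance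

-- ===== CLAIM (what is proved, stated in full; the proofs are below) =====
def Claim_equal_solution : Prop := ∀ (a : List Int), Dom_solution a → Spec_solution a (solution a)

-- ===== LEMMAS AND PROOFS =====

lemma getD_set_ne (l : List Int) (p j : Nat) (v : Int) (h : j ≠ p) : (l.set p v).getD j 0 = l.getD j 0 := by
  simp [List.getD_eq_getElem?_getD, List.getElem?_set_ne (by omega : p ≠ j)]
lemma getD_set_self (l : List Int) (p : Nat) (v : Int) (h : p < l.length) : (l.set p v).getD p 0 = v := by
  simp [List.getD_eq_getElem?_getD, h]

lemma hpLoop_spec (pos : Nat) (heap : List Int) (newitem : Int)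
    (hlen : pos < heap.length)
    (hinv : ∀ j, j < heap.length → j ≠ pos → heap.getD 0 0 ≤ heap.getD j 0) :
    ((hpLoop heap newitem pos).getD 0 0
        = if 0 < pos then min (heap.getD 0 0) newitem else newitem)
    ∧ (∀ j, j < (hpLoop heap newitem pos).length →
        (hpLoop heap newitem pos).getD j 0 = newitem ∨
        ∃ k, k < heap.length ∧ k ≠ pos ∧ (hpLoop heap newitem pos).getD j 0 = heap.getD k 0)
    ∧ (hpLoop heap newitem pos).length = heap.length := by
  induction pos using Nat.strong_induction_on generalizing heap with
  | _ pos ih =>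
  rw [hpLoop]
  by_cases hpos : 0 < pos
  · rw [if_pos hpos]
    set pp := (pos - 1) / 2 with hppdef
    have hpplt : pp < pos := Nat.lt_of_le_of_lt (Nat.div_le_self _ _) (by omega)
    have hppl : pp < heap.length := by omega
    have hpar : heap.getD 0 0 ≤ heap.getD pp 0 := hinv pp hppl (by omega)
    by_cases hlt : newitem < heap.getD pp 0
    · rw [if_pos hlt]
      have hlen' : pp < (heap.set pos (heap.getD pp 0)).length := by simpa using hppl
      have hhead' : (heap.set pos (heap.getD pp 0)).getD 0 0 = heap.getD 0 0 :=
        getD_set_ne _ _ _ _ (by omega)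
      have hinv' : ∀ j, j < (heap.set pos (heap.getD pp 0)).length → j ≠ pp →
          (heap.set pos (heap.getD pp 0)).getD 0 0 ≤ (heap.set pos (heap.getD pp 0)).getD j 0 := by
        intro j hj hjpp
        rw [hhead']
        by_cases hjpos : j = pos
        · subst hjpos; rw [getD_set_self _ _ _ hlen]; exact hpar
        · rw [getD_set_ne _ _ _ _ hjpos]
          exact hinv j (by simpa using hj) hjpos
      obtain ⟨h1, h2, h3⟩ := ih pp hpplt _ hlen' hinv'
      refine ⟨?_, ?_, by simpa using h3⟩
      · rw [h1, hhead']
        by_cases hpp0 : 0 < pp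
        · rw [if_pos hpp0, if_pos hpos]
        · rw [if_neg hpp0, if_pos hpos]
          have : pp = 0 := by omega
          rw [this] at hlt
          omega
      · intro j hj
        rcases h2 j hj with h | ⟨k, hk1, hk2, hk3⟩
        · exact Or.inl h
        · by_cases hkpos : k = pos
          · subst hkpos
            rw [getD_set_self _ _ _ hlen] at hk3
            exact Or.inr ⟨pp, hppl, by omega, hk3⟩
          · rw [getD_set_ne _ _ _ _ hkpos] at hk3
            exact Or.inr ⟨k, by simpa using hk1, hkpos, hk3⟩
    · rw [if_neg hlt]
      refine ⟨?_, ?_, by simp⟩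
      · rw [if_pos hpos, getD_set_ne _ _ _ _ (by omega : (0:Nat) ≠ pos)]
        omega
      · intro j hj
        by_cases hjpos : j = pos
        · subst hjpos; rw [getD_set_self _ _ _ hlen]; exact Or.inl rfl
        · rw [getD_set_ne _ _ _ _ hjpos]
          exact Or.inr ⟨j, by simpa using hj, hjpos, rfl⟩
  · rw [if_neg hpos]
    have hp0 : pos = 0 := by omega
    subst hp0
    refine ⟨by rw [if_neg hpos, getD_set_self _ _ _ hlen], ?_, by simp⟩
    intro j hj
    by_cases hj0 : j = 0
    · subst hj0; rw [getD_set_self _ _ _ hlen]; exact Or.inl rfl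
    · rw [getD_set_ne _ _ _ _ hj0]
      exact Or.inr ⟨j, by simpa using hj, hj0, rfl⟩

lemma getD_append_lt (l t : List Int) (j : Nat) (h : j < l.length) : (l ++ t).getD j 0 = l.getD j 0 := by
  simp [List.getD_eq_getElem?_getD, List.getElem?_append_left h]

def HeapInv (h : List Int) (m : Int) : Prop :=
  h ≠ [] ∧ h.getD 0 0 = m ∧ ∀ j, j < h.length → m ≤ h.getD j 0
lemma heappush_inv (h : List Int) (x m : Int) (hi : HeapInv h m) :
    HeapInv (heappush h x) (min m x) := by
  obtain ⟨hne, hhead, hallm⟩ := hi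
  have hlen0 : 0 < h.length := List.length_pos_iff.mpr hne
  have hlen : h.length < (h ++ [x]).length := by simp
  have hh0 : (h ++ [x]).getD 0 0 = h.getD 0 0 := getD_append_lt _ _ _ hlen0
  have hinv : ∀ j, j < (h ++ [x]).length → j ≠ h.length →
      (h ++ [x]).getD 0 0 ≤ (h ++ [x]).getD j 0 := by
    intro j hj hjne
    have hjl : j < h.length := by simp at hj; omega
    rw [hh0, getD_append_lt _ _ _ hjl, hhead]
    exact hallm j hjl
  obtain ⟨h1, h2, h3⟩ := hpLoop_spec h.length (h ++ [x]) x hlen hinv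
  unfold heappush
  refine ⟨by rw [← List.length_pos_iff, h3]; simp, ?_, ?_⟩
  · rw [h1, if_pos hlen0, hh0, hhead, min_comm]
  · intro j hj
    rcases h2 j hj with hx | ⟨k, hk1, hk2, hk3⟩
    · rw [hx]; exact min_le_right _ _
    · have hkl : k < h.length := by simp at hk1; omega
      rw [hk3, getD_append_lt _ _ _ hkl]
      exact le_trans (min_le_left _ _) (hhead ▸ hallm k hkl)

lemma heappush_head (h : List Int) (x m : Int) (hi : HeapInv h m) :
    (heappush h x).getD 0 0 = min m x := ((heappush_inv h x m hi).2).1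


def pmin (a : List Int) (k : Nat) : Int := ((a.drop 1).take k).foldl min (a.getD 0 0)
def smin (a : List Int) (k : Nat) : Int := (a.drop (k + 1)).foldl min (a.getD k 0)

lemma pmin_succ (a : List Int) (k : Nat) (hk : k + 1 < a.length) :
    pmin a (k + 1) = min (pmin a k) (a.getD (k + 1) 0) := by
  unfold pmin
  rw [List.take_add_one, List.getElem?_drop, List.getElem?_eq_getElem (by omega : 1 + k < a.length)]
  have : a[1 + k] = a.getD (k + 1) 0 := by
    rw [List.getD_eq_getElem a 0 hk]; congr 1; omega
  simp [List.foldl_append, this]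

lemma smin_pred (a : List Int) (k : Nat) (hk : 0 < k) (hk2 : k < a.length) :
    smin a (k - 1) = min (smin a k) (a.getD (k - 1) 0) := by
  unfold smin
  have h1 : k - 1 + 1 = k := by omega
  rw [h1, List.drop_eq_getElem_cons hk2]
  show (a.drop (k+1)).foldl min (min (a.getD (k-1) 0) a[k]) = _
  rw [List.foldl_assoc, List.getD_eq_getElem a 0 hk2, min_comm]

lemma getD_map_range_at (f : Nat → Int) (K m : Nat) (h : m < K) :
    ((List.range K).map f).getD m 0 = f m := by
  simp [List.getD_eq_getElem?_getD, h]

lemma getD_reverse_map_range (f : Nat → Int) (K m : Nat) (h : m < K) :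
    (((List.range K).map f).reverse).getD m 0 = f (K - 1 - m) := by
  have hl : m < (((List.range K).map f).reverse).length := by simpa using h
  rw [List.getD_eq_getElem?_getD, List.getElem?_eq_getElem hl]
  simp [List.getElem_reverse]

-- left-heap loop invariant: after the pushes for i = 1..m, the heap head is the prefix minimum
lemma leftFold (a : List Int) (ha : 4 ≤ a.length) (m : Nat) (hm : m ≤ a.length - 2) :
    HeapInv ((PySem.List.pyRange 1 (1 + (m : Int)) 1).foldl
        (fun (p : List Int × List Int) i =>
          (heappush p.1 (PySem.List.pyGetD a i 0),
           p.2 ++ [PySem.List.pyGetD (heappush p.1 (PySem.List.pyGetD a i 0)) 0 0]))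
        ([PySem.List.pyGetD a 0 0], [PySem.List.pyGetD a 0 0])).1 (pmin a m)
    ∧ ((PySem.List.pyRange 1 (1 + (m : Int)) 1).foldl
        (fun (p : List Int × List Int) i =>
          (heappush p.1 (PySem.List.pyGetD a i 0),
           p.2 ++ [PySem.List.pyGetD (heappush p.1 (PySem.List.pyGetD a i 0)) 0 0]))
        ([PySem.List.pyGetD a 0 0], [PySem.List.pyGetD a 0 0])).2
      = (List.range (m + 1)).map (pmin a) := by
  induction m with
  | zero =>
    rw [PySem.List.pyRange_one_eq_nil (by omega)]
    have h0 : PySem.List.pyGetD a 0 0 = a.getD 0 0 := PySem.List.pyGetD_zero a 0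
    simp only [List.foldl_nil]
    refine ⟨⟨by simp, by simp [h0, pmin], ?_⟩, by simp [pmin, h0, List.range_succ]⟩
    intro j hj
    simp only [List.length_cons, List.length_nil] at hj
    have hj0 : j = 0 := by omega
    subst hj0
    simp [h0, pmin]
  | succ m ih =>
    obtain ⟨ihh, ihl⟩ := ih (by omega)
    have hcast : (1 + ((m : Int) + 1)) = (1 + (m : Int)) + 1 := by ring
    rw [show ((m + 1 : Nat) : Int) = (m : Int) + 1 by push_cast; ring, hcast,
        PySem.List.pyRange_one_succ_right (by omega), List.foldl_append]
    set st := (PySem.List.pyRange 1 (1 + (m : Int)) 1).foldl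
        (fun (p : List Int × List Int) i =>
          (heappush p.1 (PySem.List.pyGetD a i 0),
           p.2 ++ [PySem.List.pyGetD (heappush p.1 (PySem.List.pyGetD a i 0)) 0 0]))
        ([PySem.List.pyGetD a 0 0], [PySem.List.pyGetD a 0 0]) with hst
    have hx : PySem.List.pyGetD a (1 + (m : Int)) 0 = a.getD (m + 1) 0 := by
      rw [show (1 + (m : Int)) = ((m + 1 : Nat) : Int) by push_cast; ring]
      exact PySem.List.pyGetD_natCast a (m + 1) 0
    have hmin : min (pmin a m) (a.getD (m + 1) 0) = pmin a (m + 1) :=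
      (pmin_succ a m (by omega)).symm
    have hpush : HeapInv (heappush st.1 (a.getD (m + 1) 0)) (pmin a (m + 1)) := by
      rw [← hmin]; exact heappush_inv _ _ _ ihh
    have hhd : PySem.List.pyGetD (heappush st.1 (PySem.List.pyGetD a (1 + (m : Int)) 0)) 0 0
        = pmin a (m + 1) := by
      rw [hx, PySem.List.pyGetD_zero, ← hmin]
      exact heappush_head _ _ _ ihh
    refine ⟨by simp only [List.foldl_cons, List.foldl_nil]; rw [hx]; exact hpush, ?_⟩
    simp only [List.foldl_cons, List.foldl_nil]
    rw [ihl, hhd]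
    simp [List.range_succ]

lemma smin_last (a : List Int) (ha : 1 ≤ a.length) :
    smin a (a.length - 1) = a.getD (a.length - 1) 0 := by
  unfold smin
  rw [show a.length - 1 + 1 = a.length by omega, List.drop_length, List.foldl_nil]

lemma rightFold (a : List Int) (ha : 4 ≤ a.length) (m : Nat) (hm : m ≤ a.length - 2) :
    HeapInv ((PySem.List.pyRange 1 (1 + (m : Int)) 1).foldl
        (fun (p : List Int × List Int) i =>
          (heappush p.1 (PySem.List.pyGetD a (-i - 1) 0),
           p.2 ++ [PySem.List.pyGetD (heappush p.1 (PySem.List.pyGetD a (-i - 1) 0)) 0 0]))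
        ([PySem.List.pyGetD a (-1) 0], [PySem.List.pyGetD a (-1) 0])).1
      (smin a (a.length - 1 - m))
    ∧ ((PySem.List.pyRange 1 (1 + (m : Int)) 1).foldl
        (fun (p : List Int × List Int) i =>
          (heappush p.1 (PySem.List.pyGetD a (-i - 1) 0),
           p.2 ++ [PySem.List.pyGetD (heappush p.1 (PySem.List.pyGetD a (-i - 1) 0)) 0 0]))
        ([PySem.List.pyGetD a (-1) 0], [PySem.List.pyGetD a (-1) 0])).2
      = (List.range (m + 1)).map (fun j => smin a (a.length - 1 - j)) := by
  have hlast : PySem.List.pyGetD a (-1) 0 = smin a (a.length - 1) := by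
    rw [PySem.List.pyGetD_neg_ofNat a 1 0 (by omega) (by omega), smin_last a (by omega),
        List.getD_eq_getElem a 0 (by omega)]
  induction m with
  | zero =>
    rw [PySem.List.pyRange_one_eq_nil (by omega)]
    simp only [List.foldl_nil, Nat.sub_zero]
    refine ⟨⟨by simp, by simp [hlast], ?_⟩, by simp [hlast, List.range_succ]⟩
    intro j hj
    simp only [List.length_cons, List.length_nil] at hj
    have hj0 : j = 0 := by omega
    subst hj0
    simp [hlast]
  | succ m ih =>
    obtain ⟨ihh, ihl⟩ := ih (by omega)
    have hcast : (1 + ((m + 1 : Nat) : Int)) = (1 + (m : Int)) + 1 := by push_cast; ring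
    rw [hcast, PySem.List.pyRange_one_succ_right (by omega), List.foldl_append]
    set st := (PySem.List.pyRange 1 (1 + (m : Int)) 1).foldl
        (fun (p : List Int × List Int) i =>
          (heappush p.1 (PySem.List.pyGetD a (-i - 1) 0),
           p.2 ++ [PySem.List.pyGetD (heappush p.1 (PySem.List.pyGetD a (-i - 1) 0)) 0 0]))
        ([PySem.List.pyGetD a (-1) 0], [PySem.List.pyGetD a (-1) 0]) with hst
    have hx : PySem.List.pyGetD a (-(1 + (m : Int)) - 1) 0 = a.getD (a.length - (m + 2)) 0 := by
      have h2 := PySem.List.pyGetD_neg_natCast a (m + 2) 0 (by omega) (by omega)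
      rw [show (-(1 + (m : Int)) - 1) = -((m + 2 : Nat) : Int) by push_cast; ring, h2,
          List.getD_eq_getElem a 0 (by omega)]
    have hmin : min (smin a (a.length - 1 - m)) (a.getD (a.length - (m + 2)) 0)
        = smin a (a.length - 1 - (m + 1)) := by
      have h1 := smin_pred a (a.length - 1 - m) (by omega) (by omega)
      rw [show a.length - 1 - m - 1 = a.length - 1 - (m + 1) by omega] at h1
      rw [show a.length - (m + 2) = a.length - 1 - (m + 1) by omega, h1,
          show a.length - 1 - (m + 1) = a.length - 1 - m - 1 by omega]
    have hpush : HeapInv (heappush st.1 (a.getD (a.length - (m + 2)) 0))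
        (smin a (a.length - 1 - (m + 1))) := by
      rw [← hmin]; exact heappush_inv _ _ _ ihh
    have hhd : PySem.List.pyGetD (heappush st.1 (PySem.List.pyGetD a (-(1 + (m : Int)) - 1) 0)) 0 0
        = smin a (a.length - 1 - (m + 1)) := by
      rw [hx, PySem.List.pyGetD_zero, ← hmin]
      exact heappush_head _ _ _ ihh
    refine ⟨by simp only [List.foldl_cons, List.foldl_nil]; rw [hx]; exact hpush, ?_⟩
    simp only [List.foldl_cons, List.foldl_nil]
    rw [ihl, hhd]
    simp [List.range_succ]

lemma sufFold (a : List Int) (ha : 4 ≤ a.length) :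
    ∀ (k : Nat), k ≤ a.length - 2 → ∀ (acc : List Int),
    (PySem.List.pyRange (k : Int) 0 (-1)).foldl
        (fun (s : List Int × Int) i => (s.1 ++ [s.2], min s.2 (PySem.List.pyGetD a i 0)))
        (acc, smin a (k + 1))
      = (acc ++ (List.range k).map (fun j => smin a (k + 1 - j)), smin a 1) := by
  intro k
  induction k with
  | zero =>
    intro _ acc
    rw [PySem.List.pyRange_neg_one_eq_nil (by omega)]
    simp
  | succ k ih =>
    intro hk acc
    rw [PySem.List.pyRange_neg_one_cons (by push_cast; omega), List.foldl_cons]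
    have hx : PySem.List.pyGetD a ((k + 1 : Nat) : Int) 0 = a.getD (k + 1) 0 :=
      PySem.List.pyGetD_natCast a (k + 1) 0
    have hmin : min (smin a (k + 1 + 1)) (a.getD (k + 1) 0) = smin a (k + 1) := by
      have h1 := smin_pred a (k + 2) (by omega) (by omega)
      rw [show k + 2 - 1 = k + 1 by omega] at h1
      rw [← h1]
    rw [show ((k + 1 : Nat) : Int) - 1 = (k : Int) by push_cast; ring]
    rw [hx, hmin]
    rw [ih (by omega) (acc ++ [smin a (k + 1 + 1)])]
    have hmap : (List.range (k + 1)).map (fun j => smin a (k + 1 + 1 - j))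
        = smin a (k + 1 + 1) :: (List.range k).map (fun j => smin a (k + 1 - j)) := by
      rw [List.range_succ_eq_map]
      simp only [List.map_cons, List.map_map, Nat.sub_zero]
      congr 1
      apply List.map_congr_left
      intro j _
      simp only [Function.comp_apply]
      congr 1
      omega
    rw [hmap]
    simp

lemma countFold (a : List Int) (ha : 4 ≤ a.length) (m : Nat) (hm : m ≤ a.length - 2) :
    ((PySem.List.pyRange 1 (1 + (m : Int)) 1).foldl
        (fun (answer : Int) i =>
          if ¬ (PySem.List.pyGetD ((List.range (a.length - 1)).map (pmin a)) i 0 < PySem.List.pyGetD a i 0 ∧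
                PySem.List.pyGetD (((List.range (a.length - 1)).map (fun j => smin a (a.length - 1 - j))).reverse) i 0 < PySem.List.pyGetD a i 0)
          then answer + 1 else answer) 2)
      = ((PySem.List.pyRange 1 (1 + (m : Int)) 1).foldl
        (fun (s : Int × Int) i =>
          ((if PySem.List.pyGetD a i 0 ≤ s.2 ∨
               PySem.List.pyGetD a i 0 ≤ PySem.List.pyGetD (((List.range (a.length - 2)).map (fun j => smin a (a.length - 1 - j))).reverse) (i - 1) 0
            then s.1 + 1 else s.1),
           min s.2 (PySem.List.pyGetD a i 0)))
        (2, PySem.List.pyGetD a 0 0)).1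
    ∧ ((PySem.List.pyRange 1 (1 + (m : Int)) 1).foldl
        (fun (s : Int × Int) i =>
          ((if PySem.List.pyGetD a i 0 ≤ s.2 ∨
               PySem.List.pyGetD a i 0 ≤ PySem.List.pyGetD (((List.range (a.length - 2)).map (fun j => smin a (a.length - 1 - j))).reverse) (i - 1) 0
            then s.1 + 1 else s.1),
           min s.2 (PySem.List.pyGetD a i 0)))
        (2, PySem.List.pyGetD a 0 0)).2 = pmin a m := by
  induction m with
  | zero =>
    rw [PySem.List.pyRange_one_eq_nil (by omega)]
    simp [pmin, PySem.List.pyGetD_zero]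
  | succ m ih =>
    obtain ⟨ih1, ih2⟩ := ih (by omega)
    have hcast : (1 + ((m + 1 : Nat) : Int)) = (1 + (m : Int)) + 1 := by push_cast; ring
    rw [hcast, PySem.List.pyRange_one_succ_right (by omega), List.foldl_append,
        List.foldl_append, List.foldl_cons, List.foldl_cons, List.foldl_nil, List.foldl_nil]
    have hion : (1 + (m : Int)) = ((m + 1 : Nat) : Int) := by push_cast; ring
    have hai : PySem.List.pyGetD a (1 + (m : Int)) 0 = a.getD (m + 1) 0 := by
      rw [hion]; exact PySem.List.pyGetD_natCast a (m + 1) 0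
    have hLM : PySem.List.pyGetD ((List.range (a.length - 1)).map (pmin a)) (1 + (m : Int)) 0
        = pmin a (m + 1) := by
      rw [hion, PySem.List.pyGetD_natCast, getD_map_range_at _ _ _ (by omega)]
    have hRM : PySem.List.pyGetD (((List.range (a.length - 1)).map (fun j => smin a (a.length - 1 - j))).reverse) (1 + (m : Int)) 0
        = smin a (m + 2) := by
      rw [hion, PySem.List.pyGetD_natCast, getD_reverse_map_range _ _ _ (by omega)]
      congr 1
      omega
    have hSUF : PySem.List.pyGetD (((List.range (a.length - 2)).map (fun j => smin a (a.length - 1 - j))).reverse) ((1 + (m : Int)) - 1) 0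
        = smin a (m + 2) := by
      rw [show (1 + (m : Int)) - 1 = ((m : Nat) : Int) by ring,
          PySem.List.pyGetD_natCast, getD_reverse_map_range _ _ _ (by omega)]
      congr 1
      omega
    have hpm : pmin a (m + 1) = min (pmin a m) (a.getD (m + 1) 0) := pmin_succ a m (by omega)
    rw [hai, hLM, hRM, hSUF, ih1, ih2, hpm]
    constructor
    · congr 1
      apply propext
      rw [min_lt_iff]
      omega
    · rfl

theorem main_eq (a : List Int) : solution a = solution_alt a := by
  by_cases h : PySem.List.len a ≤ 3
  · unfold solution solution_alt
    rw [if_pos h, if_pos h]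
  · have h4 : 4 ≤ a.length := by
      rw [PySem.List.len_eq] at h; omega
    unfold solution solution_alt
    rw [if_neg h, if_neg h]
    simp only [PySem.List.len_eq]
    have hr1 : PySem.List.pyRange 1 ((a.length : Int) - 1) 1
        = PySem.List.pyRange 1 (1 + ((a.length - 2 : Nat) : Int)) 1 := by
      congr 1; omega
    have hr2 : PySem.List.pyRange ((a.length : Int) - 2) 0 (-1)
        = PySem.List.pyRange ((a.length - 2 : Nat) : Int) 0 (-1) := by
      congr 1; omega
    have hinit : PySem.List.pyGetD a ((a.length : Int) - 1) 0 = smin a ((a.length - 2) + 1) := by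
      rw [show ((a.length : Int) - 1) = ((a.length - 1 : Nat) : Int) by omega,
          PySem.List.pyGetD_natCast, smin_last a (by omega) |>.symm]
      congr 1
      omega
    simp only [hr1, hr2, hinit]
    rw [PySem.List.foldl_prod_mk
        (f := fun (p : List Int × List Int) i =>
          (heappush p.1 (PySem.List.pyGetD a i 0),
           p.2 ++ [PySem.List.pyGetD (heappush p.1 (PySem.List.pyGetD a i 0)) 0 0]))
        (g := fun (p : List Int × List Int) i =>
          (heappush p.1 (PySem.List.pyGetD a (-i - 1) 0),
           p.2 ++ [PySem.List.pyGetD (heappush p.1 (PySem.List.pyGetD a (-i - 1) 0)) 0 0]))]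
    rw [sufFold a h4 (a.length - 2) le_rfl []]
    rw [(leftFold a h4 (a.length - 2) le_rfl).2, (rightFold a h4 (a.length - 2) le_rfl).2]
    simp only [show a.length - 2 + 1 = a.length - 1 from by omega, List.nil_append]
    exact (countFold a h4 (a.length - 2) le_rfl).1
-- ===== VERDICT (by name: the statement is the Claim_ definition above) =====
theorem solution_spec : Claim_equal_solution := by
  intro a _
  unfold Spec_solution
  exact main_eq a
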